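-- pv_equiv track=rewrite | github.com/TinoFP/PIA | PIA1.T1_problema1.py | procesar_lista
-- ===== SOURCE A (Python) =====
-- def procesar_lista (lista):
--     lista_procesada = []
--
--     for num in lista:
--         if num > 0:
--              if num not in lista_procesada:
--                 lista_procesada.append(num)
--
--     lista_procesada.sort()
--
--     # Devuelve las 2 listas
--     return lista_procesada
-- ===== SOURCE B (Python) =====
-- def procesar_lista(lista):
--     positivos = sorted(x for x in lista if x > 0)
--     resultado = []
--     for x in positivos:
--         if not resultado or x != resultado[-1]:
--             resultado.append(x)
--     return resultado
-- ===== Notes on version B (the rewrite author's own statement) =====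
-- stated objective: faster
-- what changed: Replaces the quadratic membership-scan dedup followed by a sort with: filter positives, sort once, then a single linear pass that drops elements equal to the previously kept one.
import Mathlib
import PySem

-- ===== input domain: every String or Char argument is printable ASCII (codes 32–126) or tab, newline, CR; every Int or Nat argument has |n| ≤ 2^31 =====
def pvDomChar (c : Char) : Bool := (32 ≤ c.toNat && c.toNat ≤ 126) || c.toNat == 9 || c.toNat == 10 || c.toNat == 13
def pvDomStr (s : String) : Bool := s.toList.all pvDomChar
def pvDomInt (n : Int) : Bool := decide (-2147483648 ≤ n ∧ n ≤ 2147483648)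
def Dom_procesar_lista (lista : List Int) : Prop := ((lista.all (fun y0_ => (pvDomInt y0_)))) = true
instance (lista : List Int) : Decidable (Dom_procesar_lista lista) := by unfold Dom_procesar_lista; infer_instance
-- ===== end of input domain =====

-- B replaces A's quadratic membership-scan dedup (then sort) with filter → one sort → one
-- linear adjacent-dedup pass (objective: faster, asymptotically).

-- ===== PORT A =====
-- the loop: append num if positive and not already collected
def pvAStep (acc : List Int) (num : Int) : List Int :=
  if 0 < num then (if num ∈ acc then acc else acc ++ [num]) else acc

def procesar_lista (lista : List Int) : List Int :=
  PySem.List.sorted (lista.foldl pvAStep []) (fun x => x) false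

-- ===== PORT B =====
-- keep x unless it equals the previously kept element (resultado[-1])
def pvBStep (acc : List Int) (x : Int) : List Int :=
  if acc = [] ∨ acc.getLast? ≠ some x then acc ++ [x] else acc

def procesar_lista_alt (lista : List Int) : List Int :=
  (PySem.List.sorted (lista.filter (fun x => decide (0 < x))) (fun x => x) false).foldl pvBStep []

-- ===== PRECONDITION & SPEC =====
def Spec_procesar_lista (lista : List Int) (out : List Int) : Prop := out = procesar_lista_alt lista
instance (lista : List Int) (out : List Int) : Decidable (Spec_procesar_lista lista out) := by unfold Spec_procesar_lista; infer_instance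

-- ===== CLAIM (what is proved, stated in full; the proofs are below) =====
def Claim_equal_procesar_lista : Prop := ∀ (lista : List Int), Dom_procesar_lista lista → Spec_procesar_lista lista (procesar_lista lista)

-- ===== LEMMAS AND PROOFS =====

-- A's accumulator: membership characterisation
theorem pvA_mem (lista : List Int) : ∀ (acc : List Int) (x : Int),
    x ∈ lista.foldl pvAStep acc ↔ x ∈ acc ∨ (x ∈ lista ∧ 0 < x) := by
  induction lista with
  | nil => simp
  | cons n t ih =>
    intro acc x
    simp only [List.foldl_cons, ih, pvAStep, List.mem_cons]
    split_ifs with hn hm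
    · constructor
      · rintro (h | ⟨h, hp⟩)
        · exact Or.inl h
        · exact Or.inr ⟨Or.inr h, hp⟩
      · rintro (h | ⟨rfl | h, hp⟩)
        · exact Or.inl h
        · exact Or.inl hm
        · exact Or.inr ⟨h, hp⟩
    · simp only [List.mem_append, List.mem_singleton]
      constructor
      · rintro ((h | rfl) | ⟨h, hp⟩)
        · exact Or.inl h
        · exact Or.inr ⟨Or.inl rfl, hn⟩
        · exact Or.inr ⟨Or.inr h, hp⟩
      · rintro (h | ⟨rfl | h, hp⟩)
        · exact Or.inl (Or.inl h)
        · exact Or.inl (Or.inr rfl)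
        · exact Or.inr ⟨h, hp⟩
    · constructor
      · rintro (h | ⟨h, hp⟩)
        · exact Or.inl h
        · exact Or.inr ⟨Or.inr h, hp⟩
      · rintro (h | ⟨rfl | h, hp⟩)
        · exact Or.inl h
        · exact absurd hp hn
        · exact Or.inr ⟨h, hp⟩

-- A's accumulator stays duplicate-free
theorem pvA_nodup (lista : List Int) : ∀ (acc : List Int), acc.Nodup →
    (lista.foldl pvAStep acc).Nodup := by
  induction lista with
  | nil => intro acc h; simpa using h
  | cons n t ih =>
    intro acc hacc
    simp only [List.foldl_cons, pvAStep]
    split_ifs with hn hm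
    · exact ih _ hacc
    · refine ih _ ?_
      rw [List.nodup_append]
      refine ⟨hacc, List.nodup_singleton _, ?_⟩
      intro a ha b hb
      rw [List.mem_singleton] at hb
      subst hb
      exact fun h => hm (h ▸ ha)
    · exact ih _ hacc

-- B's pass over a ≤-sorted list: result is strictly increasing with the same members
theorem pvB_fold (s : List Int) : ∀ (acc : List Int),
    s.Pairwise (· ≤ ·) → acc.Pairwise (· < ·) →
    (∀ a ∈ acc, ∀ y ∈ s, a ≤ y) →
    (s.foldl pvBStep acc).Pairwise (· < ·) ∧
      (∀ x, x ∈ s.foldl pvBStep acc ↔ x ∈ acc ∨ x ∈ s) := by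
  induction s with
  | nil => intro acc _ hacc _; simpa using hacc
  | cons v t ih =>
    intro acc hs hacc hle
    have hvle : ∀ y ∈ t, v ≤ y := (List.pairwise_cons.mp hs).1
    have ht : t.Pairwise (· ≤ ·) := (List.pairwise_cons.mp hs).2
    simp only [List.foldl_cons, pvBStep]
    by_cases hc : acc = [] ∨ acc.getLast? ≠ some v
    · rw [if_pos hc]
      have hacc' : (acc ++ [v]).Pairwise (· < ·) := by
        rw [List.pairwise_append]
        refine ⟨hacc, List.pairwise_singleton _ _, ?_⟩
        intro a ha y hy
        have hyv : y = v := List.mem_singleton.mp hy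
        have hav : a < v := by
          have hle' : a ≤ v := hle a ha v (List.mem_cons_self)
          rcases hc with hnil | hlast
          · subst hnil; simp at ha
          · rcases lt_or_eq_of_le hle' with h | h
            · exact h
            · exfalso
              subst h
              cases hml : acc.getLast? with
              | none => rw [List.getLast?_eq_none_iff] at hml; subst hml; simp at ha
              | some m =>
                have hmmem : m ∈ acc := List.mem_of_getLast? hml
                have hmv : m ≤ a := hle m hmmem a List.mem_cons_self
                have ham : a ≤ m := by
                  rcases List.getLast?_eq_some_iff.mp hml with ⟨pre, hpre⟩
                  subst hpre
                  rw [List.pairwise_append] at hacc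
                  rcases List.mem_append.mp ha with h' | h'
                  · exact le_of_lt (hacc.2.2 a h' m (List.mem_singleton_self m))
                  · rw [List.mem_singleton] at h'; exact le_of_eq h'
                exact hlast (hml.trans (by rw [le_antisymm hmv ham]))
        exact hyv ▸ hav
      have hle' : ∀ a ∈ acc ++ [v], ∀ y ∈ t, a ≤ y := by
        intro a ha y hy
        rcases List.mem_append.mp ha with h | h
        · exact hle a h y (List.mem_cons_of_mem v hy)
        · rw [List.mem_singleton] at h; subst h; exact hvle y hy
      obtain ⟨h1, h2⟩ := ih (acc ++ [v]) ht hacc' hle'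
      refine ⟨h1, fun x => ?_⟩
      rw [h2 x]
      simp only [List.mem_append, List.mem_cons]
      tauto
    · rw [if_neg hc]
      rw [not_or, not_not] at hc
      rcases hc with ⟨hc1, hc2⟩
      have hvmem : v ∈ acc := List.mem_of_getLast? hc2
      have hle' : ∀ a ∈ acc, ∀ y ∈ t, a ≤ y := fun a ha y hy =>
        hle a ha y (List.mem_cons_of_mem v hy)
      obtain ⟨h1, h2⟩ := ih acc ht hacc hle'
      refine ⟨h1, fun x => ?_⟩
      rw [h2 x]
      simp only [List.mem_cons]
      constructor
      · rintro (h | h)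
        · exact Or.inl h
        · exact Or.inr (Or.inr h)
      · rintro (h | h | h)
        · exact Or.inl h
        · subst h; exact Or.inl hvmem
        · exact Or.inr h

-- ===== VERDICT (by name: the statement is the Claim_ definition above) =====
theorem procesar_lista_spec : Claim_equal_procesar_lista := by
  intro lista _
  unfold Spec_procesar_lista procesar_lista procesar_lista_alt
  set dA := lista.foldl pvAStep [] with hdA
  set s := PySem.List.sorted (lista.filter (fun x => decide (0 < x))) (fun x => x) false with hs
  have hspw : s.Pairwise (· ≤ ·) := PySem.List.sorted_pairwise _ _
  obtain ⟨hBpw, hBmem⟩ := pvB_fold s [] hspw (List.Pairwise.nil) (by simp)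
  have hmemB : ∀ x, x ∈ s.foldl pvBStep [] ↔ x ∈ lista ∧ 0 < x := by
    intro x
    rw [hBmem x]
    simp [hs, PySem.List.mem_sorted, List.mem_filter]
  have hmemA : ∀ x, x ∈ dA ↔ x ∈ lista ∧ 0 < x := by
    intro x; rw [hdA, pvA_mem]; simp
  have hBnodup : (s.foldl pvBStep []).Nodup := hBpw.imp ne_of_lt
  have hAnodup : dA.Nodup := pvA_nodup lista [] List.nodup_nil
  have hperm : (s.foldl pvBStep []).Perm dA := by
    rw [List.perm_ext_iff_of_nodup hBnodup hAnodup]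
    intro x; rw [hmemB x, hmemA x]
  exact PySem.List.sorted_eq_of_perm_of_pairwise_lt dA (s.foldl pvBStep []) (fun x => x) hperm hBpw
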